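-- pv_equiv track=rewrite | github.com/DJBio/Python_UJ_III_semestr | Zadania_4/Zad_4_5.py | odwr_rek
-- ===== SOURCE A (Python) =====
-- def odwr_rek(L,lw,pr):
--     K = L[:]
--     if pr > len(K)-1:
--         raise ValueError2
--     if lw >= pr:
--         return K
--     else:
--         K[pr],K[lw] = K[lw],K[pr]
--         return odwr_rek(K,lw+1,pr-1)
-- ===== SOURCE B (Python) =====
-- def odwr_rek(L, lw, pr):
--     K = L[:]
--     if pr > len(K) - 1:
--         raise ValueError("pr out of range")
--     i, j = lw, pr
--     while i < j:
--         K[i], K[j] = K[j], K[i]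
--         i += 1
--         j -= 1
--     return K
-- ===== Notes on version B (the rewrite author's own statement) =====
-- stated objective: alternative
-- what changed: A recursively copies the whole list at every level and swaps one pair per copy; B makes a single copy and reverses the segment in place with an iterative two-pointer swap loop.
import Mathlib
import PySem

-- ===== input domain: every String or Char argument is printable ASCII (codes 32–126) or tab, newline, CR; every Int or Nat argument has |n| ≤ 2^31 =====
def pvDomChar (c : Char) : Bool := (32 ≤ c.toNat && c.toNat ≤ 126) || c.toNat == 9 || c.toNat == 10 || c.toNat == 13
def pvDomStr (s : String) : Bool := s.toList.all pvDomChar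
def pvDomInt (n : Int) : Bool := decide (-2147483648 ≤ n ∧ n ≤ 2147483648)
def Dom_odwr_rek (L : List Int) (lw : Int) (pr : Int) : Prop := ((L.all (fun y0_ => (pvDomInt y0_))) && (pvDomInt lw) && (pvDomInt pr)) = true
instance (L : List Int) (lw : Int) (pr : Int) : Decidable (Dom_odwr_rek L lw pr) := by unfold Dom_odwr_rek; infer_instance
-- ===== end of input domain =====

-- B replaces A's copy-the-list-per-recursion-level scheme with a single copy and an
-- iterative two-pointer swap loop; return values agree on every input Pre_ admits.

-- ===== PORT A =====
-- Literal port of A. 'K = L[:]' is a value copy (identity on Lean lists).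
-- Where the Python raises (the 'raise ValueError2' guard, or an IndexError from an
-- out-of-range index in the swap) the port returns []; Pre_odwr_rek excludes those inputs.
def odwr_rek (L : List Int) (lw : Int) (pr : Int) : List Int :=
  let K := L                                  -- K = L[:]
  if pr > (K.length : Int) - 1 then []        -- raise ValueError2 (NameError)
  else if lw ≥ pr then K
  else
    match PySem.List.pyGet? K lw, PySem.List.pyGet? K pr with
    | some vl, some vp =>
        -- K[pr], K[lw] = K[lw], K[pr]  (pySetD is exact here: both indices just read successfully)
        odwr_rek (PySem.List.pySetD (PySem.List.pySetD K pr vl) lw vp) (lw + 1) (pr - 1)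
    | _, _ => []                              -- IndexError
termination_by (pr - lw).toNat
decreasing_by omega

-- ===== PORT B =====
-- the 'while i < j' loop of B, acting on the copied list K
def pvSwapLoop (K : List Int) (i : Int) (j : Int) : List Int :=
  if i < j then
    match PySem.List.pyGet? K i with
    | none => []                              -- IndexError on K[i]
    | some vi =>
      match PySem.List.pyGet? K j with
      | none => []                            -- IndexError on K[j]
      | some vj =>
          -- K[i], K[j] = K[j], K[i]
          pvSwapLoop (PySem.List.pySetD (PySem.List.pySetD K i vj) j vi) (i + 1) (j - 1)
  else K
termination_by (j - i).toNat
decreasing_by omega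

def odwr_rek_alt (L : List Int) (lw : Int) (pr : Int) : List Int :=
  let K := L                                  -- K = L[:]
  if pr > (K.length : Int) - 1 then []        -- raise ValueError
  else pvSwapLoop K lw pr

-- ===== PRECONDITION & SPEC =====
-- Pre_ excludes exactly the inputs where A raises: pr > len(L)-1 (the explicit raise),
-- and lw < -len(L) with at least one swap pending (IndexError on K[lw]).
def Pre_odwr_rek (L : List Int) (lw : Int) (pr : Int) : Prop :=
  pr ≤ (L.length : Int) - 1 ∧ (pr ≤ lw ∨ -(L.length : Int) ≤ lw)
instance (L : List Int) (lw : Int) (pr : Int) : Decidable (Pre_odwr_rek L lw pr) := by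
  unfold Pre_odwr_rek; infer_instance
def pvWitness_odwr_rek : List Int × Int × Int := ([1, 2, 3, 4, 5], 1, 3)

def Spec_odwr_rek (L : List Int) (lw : Int) (pr : Int) (out : List Int) : Prop := out = odwr_rek_alt L lw pr
instance (L : List Int) (lw : Int) (pr : Int) (out : List Int) : Decidable (Spec_odwr_rek L lw pr out) := by unfold Spec_odwr_rek; infer_instance

-- ===== CLAIM (what is proved, stated in full; the proofs are below) =====
def Claim_equal_odwr_rek : Prop := ∀ (L : List Int) (lw : Int) (pr : Int), Dom_odwr_rek L lw pr → Pre_odwr_rek L lw pr → Spec_odwr_rek L lw pr (odwr_rek L lw pr)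

-- ===== LEMMAS AND PROOFS =====

theorem pv_idx_of_get (K : List Int) (i v : Int) (h : PySem.List.pyGet? K i = some v) :
    ∃ k : Nat, PySem.List.pyIdx? K.length i = some k ∧ k < K.length ∧ K[k]? = some v := by
  simp only [PySem.List.pyGet?] at h
  rcases hk : PySem.List.pyIdx? K.length i with _ | k
  · rw [hk] at h; simp at h
  · rw [hk] at h
    simp only [Option.bind_some] at h
    have hkl : k < K.length := by
      by_contra hc
      rw [List.getElem?_eq_none_iff.mpr (by omega)] at h
      simp at h
    exact ⟨k, rfl, hkl, h⟩

theorem pv_setD_eq (K : List Int) (i v : Int) (k : Nat)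
    (hk : PySem.List.pyIdx? K.length i = some k) :
    PySem.List.pySetD K i v = K.set k v := by
  simp [PySem.List.pySetD, PySem.List.pySet?, hk]

-- The two swap orders (A sets index pr first, B sets index lw first) give the same list.
theorem pv_swap_comm (K : List Int) (a b va vb : Int)
    (ha : PySem.List.pyGet? K a = some va) (hb : PySem.List.pyGet? K b = some vb) :
    PySem.List.pySetD (PySem.List.pySetD K b va) a vb
      = PySem.List.pySetD (PySem.List.pySetD K a vb) b va := by
  obtain ⟨ka, hka, hkal, hva⟩ := pv_idx_of_get K a va ha
  obtain ⟨kb, hkb, hkbl, hvb⟩ := pv_idx_of_get K b vb hb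
  rw [pv_setD_eq K b va kb hkb, pv_setD_eq K a vb ka hka,
      pv_setD_eq _ a vb ka (by rw [List.length_set]; exact hka),
      pv_setD_eq _ b va kb (by rw [List.length_set]; exact hkb)]
  by_cases hab : ka = kb
  · subst hab
    have hv : va = vb := by rw [hva] at hvb; exact Option.some.inj hvb
    rw [List.set_set, List.set_set, hv]
  · exact List.set_comm _ _ (Ne.symm hab)

theorem pv_agree : ∀ (n : Nat) (L : List Int) (lw pr : Int), (pr - lw).toNat ≤ n →
    pr ≤ (L.length : Int) - 1 → odwr_rek L lw pr = pvSwapLoop L lw pr := by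
  intro n
  induction n with
  | zero =>
    intro L lw pr hn hpr
    rw [odwr_rek, pvSwapLoop, if_neg (by omega : ¬ pr > (L.length : Int) - 1),
        if_pos (by omega : lw ≥ pr), if_neg (by omega : ¬ lw < pr)]
  | succ n ih =>
    intro L lw pr hn hpr
    rw [odwr_rek, pvSwapLoop, if_neg (by omega : ¬ pr > (L.length : Int) - 1)]
    by_cases hlt : lw < pr
    · rw [if_neg (by omega : ¬ lw ≥ pr), if_pos hlt]
      rcases h1 : PySem.List.pyGet? L lw with _ | vl
      · rfl
      rcases h2 : PySem.List.pyGet? L pr with _ | vp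
      · rfl
      obtain ⟨k1, hk1, hk1l, _⟩ := pv_idx_of_get L lw vl h1
      obtain ⟨k2, hk2, hk2l, _⟩ := pv_idx_of_get L pr vp h2
      have hswap := pv_swap_comm L lw pr vl vp h1 h2
      have hlen : (PySem.List.pySetD (PySem.List.pySetD L lw vp) pr vl).length = L.length := by
        rw [pv_setD_eq L lw vp k1 hk1,
            pv_setD_eq _ pr vl k2 (by rw [List.length_set]; exact hk2)]
        simp
      simp only [hswap]
      exact ih _ (lw + 1) (pr - 1) (by omega) (by rw [hlen]; omega)
    · rw [if_pos (by omega : lw ≥ pr), if_neg hlt]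

-- ===== VERDICT (by name: the statement is the Claim_ definition above) =====
theorem odwr_rek_spec : Claim_equal_odwr_rek := by
  intro L lw pr _ hpre
  unfold Spec_odwr_rek odwr_rek_alt
  simp only [if_neg (by have := hpre.1; omega : ¬ pr > (L.length : Int) - 1)]
  exact pv_agree (pr - lw).toNat L lw pr le_rfl hpre.1
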